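-- pv_equiv track=rewrite | github.com/hassanelsheikha/EssayBrainstormer | sentence_tools.py | extract_first_sentence
-- ===== SOURCE A (Python) =====
-- PUNCTUATION = ['.', '!', '?']
--
-- def extract_first_sentence(text: str) -> str:
--     """Return the first sentence in <text>. A sentence is defined as a string of
--     words that ends with a period. If there is a sentence that occurs after
--     another, there must be a space preceeding the second sentence.
--
--     Precondition: <text> contains a sentence.
--
--     >>> extract_first_sentence('Hello there. Nice to meet you.')
--     'Hello there.'
--     >>> extract_first_sentence('Hello. ')
--     'Hello.'
--     """
--     i = 0
--     first_sentence = ''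
--     while i != len(text):
--         try:
--             first_sentence += text[i]
--             if text[i] in PUNCTUATION and (text[i + 1] == ' ' or
--                                            text[i + 1] == '\n'):
--                 return first_sentence
--         except IndexError:
--             return first_sentence
--         i += 1
--     return first_sentence
-- ===== SOURCE B (Python) =====
-- import re
--
-- _BOUNDARY = re.compile(r'[.!?](?=[ \n]|\Z)')
--
-- def extract_first_sentence(text: str) -> str:
--     m = _BOUNDARY.search(text)
--     return text[:m.end()] if m else text
-- ===== Notes on version B (the rewrite author's own statement) =====
-- stated objective: idiomatic
-- what changed: Replaces the manual index loop with accumulator and try/except IndexError by a single compiled-regex search for the sentence boundary ([.!?] followed by space/newline or end of string) plus a slice.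
import Mathlib
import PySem

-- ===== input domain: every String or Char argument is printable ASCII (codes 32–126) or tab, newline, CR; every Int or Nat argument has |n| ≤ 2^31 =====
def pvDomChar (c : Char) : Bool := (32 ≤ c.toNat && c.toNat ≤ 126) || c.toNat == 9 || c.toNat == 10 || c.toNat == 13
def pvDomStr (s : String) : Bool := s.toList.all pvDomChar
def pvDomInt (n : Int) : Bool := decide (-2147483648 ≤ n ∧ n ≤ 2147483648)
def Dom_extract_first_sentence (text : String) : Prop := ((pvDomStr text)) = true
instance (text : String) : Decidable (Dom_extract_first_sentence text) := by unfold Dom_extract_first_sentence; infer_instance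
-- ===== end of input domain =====

-- B replaces A's accumulate-inside-a-scan loop by a single regex boundary search plus a slice (idiomatic).

-- ===== PORT A =====
-- A: while loop over indices, appending text[i] to first_sentence; returns early at a
-- punctuation char followed by ' '/'\n', and the caught IndexError at the last char
-- also returns the accumulator. Ported as structural recursion carrying the accumulator.
def extractA_go (acc : List Char) : List Char → List Char
  | [] => acc
  | c :: rest =>
    let acc' := acc ++ [c]
    if c = '.' ∨ c = '!' ∨ c = '?' then
      match rest with
      | [] => acc'                      -- text[i+1] raises IndexError → return first_sentence
      | d :: _ => if d = ' ' ∨ d = '\n' then acc' else extractA_go acc' rest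
    else extractA_go acc' rest

def extract_first_sentence (text : String) : String :=
  String.ofList (extractA_go [] text.toList)

-- ===== PORT B =====
-- B: re.search(r'[.!?](?=[ \n]|\Z)', text); the regex automaton's leftmost match is the
-- first position holding '.'/'!'/'?' whose successor is ' '/'\n' or end of string.
def pySpaceNext : List Char → Bool
  | [] => true
  | d :: _ => d = ' ' || d = '\n'

def findBoundary : List Char → Option Nat
  | [] => none
  | c :: rest =>
    if (c = '.' || c = '!' || c = '?') && pySpaceNext rest then some 0
    else (findBoundary rest).map (· + 1)

def extract_first_sentence_alt (text : String) : String :=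
  match findBoundary text.toList with
  | some i => String.ofList (text.toList.take (i + 1))   -- text[:m.end()]
  | none => text

-- ===== PRECONDITION & SPEC =====
def Spec_extract_first_sentence (text : String) (out : String) : Prop := out = extract_first_sentence_alt text
instance (text : String) (out : String) : Decidable (Spec_extract_first_sentence text out) := by unfold Spec_extract_first_sentence; infer_instance

-- ===== CLAIM (what is proved, stated in full; the proofs are below) =====
def Claim_equal_extract_first_sentence : Prop := ∀ (text : String), Dom_extract_first_sentence text → Spec_extract_first_sentence text (extract_first_sentence text)

-- ===== LEMMAS AND PROOFS =====

def boundaryResult (cs : List Char) : List Char :=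
  match findBoundary cs with
  | some i => cs.take (i + 1)
  | none => cs

theorem extractA_go_eq (cs : List Char) : ∀ acc, extractA_go acc cs = acc ++ boundaryResult cs := by
  induction cs with
  | nil => intro acc; simp [extractA_go, boundaryResult, findBoundary]
  | cons c rest ih =>
    intro acc
    by_cases hp : c = '.' ∨ c = '!' ∨ c = '?'
    · have hpb : (c = '.' || c = '!' || c = '?') = true := by
        simp [hp, or_assoc]
      cases rest with
      | nil =>
        simp [extractA_go, boundaryResult, findBoundary, hp, hpb, pySpaceNext]
      | cons d t =>
        by_cases hd : d = ' ' ∨ d = '\n'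
        · have hsp : pySpaceNext (d :: t) = true := by simp [pySpaceNext, hd]
          simp [extractA_go, boundaryResult, findBoundary, hp, hd, hpb, hsp]
        · have hsp : pySpaceNext (d :: t) = false := by
            simp [pySpaceNext]
            exact ⟨fun h => hd (Or.inl h), fun h => hd (Or.inr h)⟩
          rw [show extractA_go acc (c :: d :: t)
              = extractA_go (acc ++ [c]) (d :: t) by simp [extractA_go, hp, hd]]
          rw [ih]
          unfold boundaryResult
          rw [show findBoundary (c :: d :: t) = (findBoundary (d :: t)).map (· + 1) by
            simp [findBoundary, hsp]]
          cases h : findBoundary (d :: t) <;> simp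
    · have hpb : (c = '.' || c = '!' || c = '?') = false := by
        simp only [Bool.or_eq_false_iff, decide_eq_false_iff_not]; push Not at hp; exact ⟨⟨hp.1, hp.2.1⟩, hp.2.2⟩
      rw [show extractA_go acc (c :: rest) = extractA_go (acc ++ [c]) rest by
        simp [extractA_go, hp]]
      rw [ih]
      unfold boundaryResult
      rw [show findBoundary (c :: rest) = (findBoundary rest).map (· + 1) by
        simp [findBoundary, hpb]]
      cases h : findBoundary rest <;> simp

-- ===== VERDICT (by name: the statement is the Claim_ definition above) =====
theorem extract_first_sentence_spec : Claim_equal_extract_first_sentence := by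
  intro text _
  unfold Spec_extract_first_sentence extract_first_sentence extract_first_sentence_alt
  rw [extractA_go_eq]
  unfold boundaryResult
  cases h : findBoundary text.toList with
  | some i => simp
  | none => simp [String.ofList_toList]
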